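-- pv_equiv track=rewrite | github.com/bar-nir/cloud-computing-ex2 | setup3.py | get_public_ips
-- ===== SOURCE A (Python) =====
-- def get_public_ips(stack_outputs):
--     public_ip_instance_1 = next(
--         (output['OutputValue'] for output in stack_outputs if output['OutputKey'] == "Instance1PublicIP"), None)
--
--     public_ip_instance_2 = next(
--         (output['OutputValue'] for output in stack_outputs if output['OutputKey'] == "Instance2PublicIP"), None)
--
--     instances_ids = [output['OutputValue']
--                      for output in stack_outputs if "InstanceID" in output['OutputKey']]
--
--     return public_ip_instance_1, public_ip_instance_2, instances_ids
-- ===== SOURCE B (Python) =====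
-- def get_public_ips(stack_outputs):
--     public_ip_instance_1 = None
--     public_ip_instance_2 = None
--     instances_ids = []
--     for output in stack_outputs:
--         key = output['OutputKey']
--         if key == "Instance1PublicIP" and public_ip_instance_1 is None:
--             public_ip_instance_1 = output['OutputValue']
--         elif key == "Instance2PublicIP" and public_ip_instance_2 is None:
--             public_ip_instance_2 = output['OutputValue']
--         if "InstanceID" in key:
--             instances_ids.append(output['OutputValue'])
--     return public_ip_instance_1, public_ip_instance_2, instances_ids
-- ===== Notes on version B (the rewrite author's own statement) =====
-- stated objective: alternative
-- what changed: Replaced A's three separate scans (two next() generators and a list comprehension) by one single pass that maintains the two first-match slots (with an is-None guard) and the id list together.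
import Mathlib
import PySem

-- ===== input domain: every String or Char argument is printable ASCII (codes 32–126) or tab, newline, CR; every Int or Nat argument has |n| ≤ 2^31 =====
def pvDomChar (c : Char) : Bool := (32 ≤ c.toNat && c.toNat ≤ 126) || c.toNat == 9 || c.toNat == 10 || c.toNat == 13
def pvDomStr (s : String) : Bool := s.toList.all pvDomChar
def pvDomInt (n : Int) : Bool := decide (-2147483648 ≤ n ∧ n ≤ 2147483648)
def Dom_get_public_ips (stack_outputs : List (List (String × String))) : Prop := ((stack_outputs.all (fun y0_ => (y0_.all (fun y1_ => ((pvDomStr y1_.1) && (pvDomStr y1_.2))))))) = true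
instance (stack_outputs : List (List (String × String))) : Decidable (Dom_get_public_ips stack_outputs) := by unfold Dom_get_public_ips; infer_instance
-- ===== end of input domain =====

-- B replaces A's three separate scans by one single pass with first-match guards; same return value on Pre_.


-- shared accessors: output['OutputKey'] / output['OutputValue'];
-- getD "" is exact on Pre_ (the key is present there; Python raises KeyError otherwise, excluded by Pre_)
def pvKeyOf (d : List (String × String)) : String := ((PySem.Dict.mk d).get? "OutputKey").getD ""
def pvValOf (d : List (String × String)) : String := ((PySem.Dict.mk d).get? "OutputValue").getD ""

-- ===== PORT A ===== (three passes: two next(...) generators, then a list comprehension)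
def get_public_ips (stack_outputs : List (List (String × String))) : Option String × Option String × List String :=
  let public_ip_instance_1 :=
    (stack_outputs.find? (fun output => pvKeyOf output == "Instance1PublicIP")).map pvValOf
  let public_ip_instance_2 :=
    (stack_outputs.find? (fun output => pvKeyOf output == "Instance2PublicIP")).map pvValOf
  let instances_ids :=
    (stack_outputs.filter (fun output => PySem.Str.isIn "InstanceID" (pvKeyOf output))).map pvValOf
  (public_ip_instance_1, public_ip_instance_2, instances_ids)

-- ===== PORT B ===== (single pass; first-match guards via Option.isNone)
def pvStepB (st : Option String × Option String × List String) (output : List (String × String)) :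
    Option String × Option String × List String :=
  let key := pvKeyOf output
  let st1 :=
    if key == "Instance1PublicIP" && st.1.isNone then
      (some (pvValOf output), st.2.1, st.2.2)
    else if key == "Instance2PublicIP" && st.2.1.isNone then
      (st.1, some (pvValOf output), st.2.2)
    else st
  if PySem.Str.isIn "InstanceID" key then (st1.1, st1.2.1, st1.2.2 ++ [pvValOf output]) else st1

def get_public_ips_alt (stack_outputs : List (List (String × String))) : Option String × Option String × List String :=
  stack_outputs.foldl pvStepB (none, none, [])

-- ===== PRECONDITION & SPEC =====
-- Pre_ holds exactly where Python A returns: every output has 'OutputKey', the first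
-- 'Instance1PublicIP'/'Instance2PublicIP' match (if any) has 'OutputValue', and every output whose
-- key contains 'InstanceID' has 'OutputValue' (A raises KeyError otherwise).
def Pre_get_public_ips (stack_outputs : List (List (String × String))) : Prop :=
  (stack_outputs.all (fun d => (PySem.Dict.mk d).contains "OutputKey")) = true ∧
  ((stack_outputs.find? (fun d => pvKeyOf d == "Instance1PublicIP")).all
      (fun d => (PySem.Dict.mk d).contains "OutputValue")) = true ∧
  ((stack_outputs.find? (fun d => pvKeyOf d == "Instance2PublicIP")).all
      (fun d => (PySem.Dict.mk d).contains "OutputValue")) = true ∧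
  (stack_outputs.all (fun d =>
      !(PySem.Str.isIn "InstanceID" (pvKeyOf d)) || (PySem.Dict.mk d).contains "OutputValue")) = true
instance (stack_outputs : List (List (String × String))) : Decidable (Pre_get_public_ips stack_outputs) := by unfold Pre_get_public_ips; infer_instance

def pvWitness_get_public_ips : (List (List (String × String))) :=
  [[("OutputKey", "Instance1PublicIP"), ("OutputValue", "1.2.3.4")],
   [("OutputKey", "InstanceID1"), ("OutputValue", "i-0abc")]]

def Spec_get_public_ips (stack_outputs : List (List (String × String))) (out : Option String × Option String × List String) : Prop := out = get_public_ips_alt stack_outputs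
instance (stack_outputs : List (List (String × String))) (out : Option String × Option String × List String) : Decidable (Spec_get_public_ips stack_outputs out) := by unfold Spec_get_public_ips; infer_instance

-- ===== CLAIM (what is proved, stated in full; the proofs are below) =====
def Claim_equal_get_public_ips : Prop := ∀ (stack_outputs : List (List (String × String))), Dom_get_public_ips stack_outputs → Pre_get_public_ips stack_outputs → Spec_get_public_ips stack_outputs (get_public_ips stack_outputs)

-- ===== LEMMAS AND PROOFS =====

-- Loop invariant for B's single pass: starting from any state, the fold fills the still-empty
-- slots with A's first matches and appends A's id list.
theorem pvFoldB_eq (xs : List (List (String × String))) (o1 o2 : Option String) (acc : List String) :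
    xs.foldl pvStepB (o1, o2, acc) =
      (o1.or ((xs.find? (fun d => pvKeyOf d == "Instance1PublicIP")).map pvValOf),
       o2.or ((xs.find? (fun d => pvKeyOf d == "Instance2PublicIP")).map pvValOf),
       acc ++ (xs.filter (fun d => PySem.Str.isIn "InstanceID" (pvKeyOf d))).map pvValOf) := by
  induction xs generalizing o1 o2 acc with
  | nil => simp
  | cons d xs ih =>
    simp only [List.foldl_cons, List.find?_cons, List.filter_cons]
    by_cases h1 : pvKeyOf d = "Instance1PublicIP"
    · cases o1 with
      | none =>
        simp [pvStepB, h1, ih]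
        split_ifs <;> simp_all
      | some a =>
        simp [pvStepB, h1, ih]
        split_ifs <;> simp_all
    · by_cases h2 : pvKeyOf d = "Instance2PublicIP"
      · cases o2 with
        | none =>
          simp [pvStepB, h2, ih]
          split_ifs <;> simp_all
        | some a =>
          simp [pvStepB, h2, ih]
          split_ifs <;> simp_all
      · have h1' : (pvKeyOf d == "Instance1PublicIP") = false := by simp [h1]
        have h2' : (pvKeyOf d == "Instance2PublicIP") = false := by simp [h2]
        simp [pvStepB, h1', h2', ih]
        split_ifs <;> simp_all

-- ===== VERDICT (by name: the statement is the Claim_ definition above) =====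
theorem get_public_ips_spec : Claim_equal_get_public_ips := by
  intro xs _ _
  unfold Spec_get_public_ips get_public_ips get_public_ips_alt
  simp [pvFoldB_eq]
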